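-- pv_equiv track=rewrite | github.com/baja1223/Taytrade | src/utils.py | _columns_look_headerless
-- ===== SOURCE A (Python) =====
-- from typing import Dict, Generator, List, Optional
--
-- def _columns_look_headerless(cols: List[str]) -> bool:
--     lowers = [str(c).strip().lower() for c in cols]
--     if any(k in lowers for k in ["open", "high", "low", "close", "volume", "timestamp", "time", "c", "o", "h", "l", "v"]):
--         return False
--     numeric_like = 0
--     for c in cols:
--         s = str(c).strip().replace(".", "", 1).replace("-", "", 1)
--         if s.isdigit():
--             numeric_like += 1
--     return numeric_like >= max(3, len(cols) // 2)
-- ===== SOURCE B (Python) =====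
-- _KEYWORDS = frozenset(["open", "high", "low", "close", "volume", "timestamp", "time", "c", "o", "h", "l", "v"])
--
-- def _numeric_like(s):
--     # character-classifying counter: all chars must be digits, at most one '.',
--     # at most one '-', and at least one digit
--     dots = dashes = digits = 0
--     for ch in s:
--         if ch.isdigit():
--             digits += 1
--         elif ch == '.':
--             dots += 1
--         elif ch == '-':
--             dashes += 1
--         else:
--             return False
--     return dots <= 1 and dashes <= 1 and digits >= 1
--
-- def _columns_look_headerless(cols):
--     stripped = [str(c).strip() for c in cols]
--     if not _KEYWORDS.isdisjoint(s.lower() for s in stripped):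
--         return False
--     return sum(map(_numeric_like, stripped)) >= max(3, len(cols) // 2)
-- ===== Notes on version B (the rewrite author's own statement) =====
-- stated objective: faster
-- what changed: B tests numeric-likeness by classifying characters into digit/dot/dash counters (all chars must be digit, '.' or '-', at most one '.', at most one '-', at least one digit) instead of A's string surgery (drop first '.', drop first '-', then isdigit), and replaces A's 12 membership scans of the lowered-column list by one frozenset disjointness test over the stripped columns, counting matches with sum(map(...)).
import Mathlib
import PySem

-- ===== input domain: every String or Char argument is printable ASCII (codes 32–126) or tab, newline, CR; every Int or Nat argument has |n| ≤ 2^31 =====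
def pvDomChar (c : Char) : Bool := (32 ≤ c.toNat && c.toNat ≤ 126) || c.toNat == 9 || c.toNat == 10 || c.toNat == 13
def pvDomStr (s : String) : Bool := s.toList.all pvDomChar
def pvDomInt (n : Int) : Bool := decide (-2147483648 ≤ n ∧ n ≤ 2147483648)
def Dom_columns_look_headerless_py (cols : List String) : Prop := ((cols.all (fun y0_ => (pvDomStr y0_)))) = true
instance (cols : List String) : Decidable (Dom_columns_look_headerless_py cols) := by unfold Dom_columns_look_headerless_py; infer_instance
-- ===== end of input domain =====

-- B replaces A's string-surgery numeric test (drop first '.', drop first '-', then isdigit) by a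
-- character-classifying counter (every char digit/'.'/'-', at most one '.', at most one '-', at
-- least one digit) and A's keyword scan by a set-disjointness test over the stripped columns.


-- ===== PORT A =====
-- s.replace(".", "", 1) for a one-char pattern = drop the first occurrence of that char;
-- exact hand port (PySem has no count-limited replace)
def pvRemoveFirst : List Char → Char → List Char
  | [], _ => []
  | x :: xs, c => if x = c then xs else x :: pvRemoveFirst xs c

-- str(c).strip().replace(".", "", 1).replace("-", "", 1)
def pvNumForm (c : String) : List Char :=
  pvRemoveFirst (pvRemoveFirst (PySem.Str.strip c).toList '.') '-'

def pvKeywords : List String :=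
  ["open", "high", "low", "close", "volume", "timestamp", "time", "c", "o", "h", "l", "v"]

def columns_look_headerless_py (cols : List String) : Bool :=
  let lowers := cols.map (fun c => PySem.Str.lower (PySem.Str.strip c))
  if pvKeywords.any (fun k => lowers.contains k) then false
  else
    let numeric_like : Int := cols.foldl (fun n c =>
      if PySem.Chars.strIsdigit (pvNumForm c) then n + 1 else n) 0
    decide (numeric_like ≥ max 3 ((cols.length / 2 : Nat) : Int))

-- ===== PORT B =====
-- the frozenset of header keywords
def pvKeywordSet : PySem.Set String := PySem.Set.ofList
  ["open", "high", "low", "close", "volume", "timestamp", "time", "c", "o", "h", "l", "v"]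

-- _numeric_like's loop: classify each char into three counters, reject any other char,
-- then check the counters
def pvNumLikeLoop : List Char → Nat → Nat → Nat → Bool
  | [], dots, dashes, digits => decide (dots ≤ 1) && decide (dashes ≤ 1) && decide (1 ≤ digits)
  | ch :: rest, dots, dashes, digits =>
    if PySem.Chars.isdigit ch then pvNumLikeLoop rest dots dashes (digits + 1)
    else if ch = '.' then pvNumLikeLoop rest (dots + 1) dashes digits
    else if ch = '-' then pvNumLikeLoop rest dots (dashes + 1) digits
    else false

def pvNumericLike (s : String) : Bool := pvNumLikeLoop s.toList 0 0 0

def columns_look_headerless_py_alt (cols : List String) : Bool :=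
  let stripped := cols.map (fun c => PySem.Str.strip c)
  if !(PySem.Set.isdisjoint pvKeywordSet (stripped.map (fun s => PySem.Str.lower s))) then false
  else decide (((stripped.map (fun s => if pvNumericLike s then (1 : Int) else 0)).sum)
                ≥ max 3 ((cols.length / 2 : Nat) : Int))

-- ===== PRECONDITION & SPEC =====
def Spec_columns_look_headerless_py (cols : List String) (out : Bool) : Prop := out = columns_look_headerless_py_alt cols
instance (cols : List String) (out : Bool) : Decidable (Spec_columns_look_headerless_py cols out) := by unfold Spec_columns_look_headerless_py; infer_instance

-- ===== CLAIM (what is proved, stated in full; the proofs are below) =====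
def Claim_equal_columns_look_headerless_py : Prop := ∀ (cols : List String), Dom_columns_look_headerless_py cols → Spec_columns_look_headerless_py cols (columns_look_headerless_py cols)

-- ===== LEMMAS AND PROOFS =====

-- a char B's classifier accepts
def pvGood (c : Char) : Bool := PySem.Chars.isdigit c || c = '.' || c = '-'

-- removing one occurrence of a non-digit char does not change the number of digits
theorem pv_countP_rf (c : Char) (hc : PySem.Chars.isdigit c = false) :
    ∀ l : List Char, (pvRemoveFirst l c).countP PySem.Chars.isdigit = l.countP PySem.Chars.isdigit := by
  intro l; induction l with
  | nil => rfl
  | cons x xs ih =>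
    by_cases hx : x = c
    · subst hx; simp [pvRemoveFirst, hc]
    · simp [pvRemoveFirst, hx, List.countP_cons, ih]

-- strIsdigit = "all digits, and at least one"
theorem pv_strIsdigit_eq_all (l : List Char) :
    PySem.Chars.strIsdigit l =
      (l.all PySem.Chars.isdigit && decide (1 ≤ l.countP PySem.Chars.isdigit)) := by
  induction l with
  | nil => decide
  | cons x xs ih =>
    by_cases hx : PySem.Chars.isdigit x = true
    · simp [PySem.Chars.strIsdigit, hx]
    · simp [PySem.Chars.strIsdigit, hx]

-- "all p" versus "all (p or = c), and no c at all", when p rejects c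
theorem pv_all_eq_all_or (p : Char → Bool) (c : Char) (hc : p c = false) :
    ∀ l : List Char, l.all p = (l.all (fun d => p d || d = c) && decide (l.count c = 0)) := by
  intro l; induction l with
  | nil => rfl
  | cons x xs ih =>
    by_cases hx : x = c
    · subst hx; simp [hc, ih]
    · by_cases hp : p x = true
      · simp [hx, hp, ih]
      · simp [hx, hp]

-- removing one occurrence of a char the predicate rejects, versus the predicate on the whole list
theorem pv_all_rf (p : Char → Bool) (c : Char) (hc : p c = false) :
    ∀ l : List Char, (pvRemoveFirst l c).all p =
      (l.all (fun d => p d || d = c) && decide (l.count c ≤ 1)) := by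
  intro l; induction l with
  | nil => simp [pvRemoveFirst]
  | cons x xs ih =>
    by_cases hx : x = c
    · subst hx
      have hrf : pvRemoveFirst (x :: xs) x = xs := by simp [pvRemoveFirst]
      have hd : decide (xs.count x = 0) = decide (xs.count x + 1 ≤ 1) := by
        rw [decide_eq_decide]; omega
      rw [hrf, List.count_cons_self, List.all_cons, pv_all_eq_all_or p x hc xs, hd]
      simp [hc]
    · by_cases hp : p x = true
      · simp [pvRemoveFirst, hx, ih, hp]
      · simp [pvRemoveFirst, hx, hp]

-- all-digits after A's double removal = B's per-char classification plus the two count bounds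
theorem pv_count_rf (c d : Char) (hcd : ¬ d = c) :
    ∀ l : List Char, (pvRemoveFirst l c).count d = l.count d := by
  intro l; induction l with
  | nil => rfl
  | cons x xs ih =>
    by_cases hx : x = c
    · subst hx
      have hrf : pvRemoveFirst (x :: xs) x = xs := by simp [pvRemoveFirst]
      have hxd : ¬ x = d := fun h => hcd h.symm
      rw [hrf, List.count_cons]
      simp [hxd]
    · simp [pvRemoveFirst, hx, List.count_cons, ih]

theorem pv_or_swap (d : Char) :
    ((PySem.Chars.isdigit d || decide (d = '-')) || decide (d = '.')) = pvGood d := by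
  simp [pvGood, Bool.or_comm, Bool.or_left_comm]

theorem pv_all_rf2 (l : List Char) :
    (pvRemoveFirst (pvRemoveFirst l '.') '-').all PySem.Chars.isdigit =
      (l.all pvGood && decide (l.count '.' ≤ 1) && decide (l.count '-' ≤ 1)) := by
  rw [pv_all_rf PySem.Chars.isdigit '-' (by decide),
      pv_all_rf (fun d => PySem.Chars.isdigit d || d = '-') '.' (by decide),
      pv_count_rf '.' '-' (by decide)]
  simp only [pv_or_swap, Bool.and_assoc]

-- B's counting loop, in closed form over its three counters
theorem pv_numLikeLoop_eq (l : List Char) : ∀ dots dashes digits : Nat,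
    pvNumLikeLoop l dots dashes digits =
      (l.all pvGood && decide (dots + l.count '.' ≤ 1) && decide (dashes + l.count '-' ≤ 1)
        && decide (1 ≤ digits + l.countP PySem.Chars.isdigit)) := by
  induction l with
  | nil => intro dots dashes digits; simp [pvNumLikeLoop]
  | cons x xs ih =>
    intro dots dashes digits
    rw [Bool.eq_iff_iff]
    by_cases hp : PySem.Chars.isdigit x = true
    · have hdot : ¬ x = '.' := fun h => by subst h; exact absurd hp (by decide)
      have hdash : ¬ x = '-' := fun h => by subst h; exact absurd hp (by decide)
      have hg : pvGood x = true := by simp [pvGood, hp]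
      simp [pvNumLikeLoop, hp, hdot, hdash, hg, ih]
      intros; omega
    · by_cases hdot : x = '.'
      · subst hdot
        simp [pvNumLikeLoop, hp, ih, pvGood]
        intros; omega
      · by_cases hdash : x = '-'
        · subst hdash
          simp [pvNumLikeLoop, hp, hdot, ih, pvGood]
          intros; omega
        · have hg : pvGood x = false := by simp [pvGood, hp, hdot, hdash]
          simp [pvNumLikeLoop, hp, hdot, hdash, hg]

-- the two per-column numeric tests agree
theorem pv_numeric_eq (c : String) :
    PySem.Chars.strIsdigit (pvNumForm c) = pvNumericLike (PySem.Str.strip c) := by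
  unfold pvNumForm pvNumericLike
  rw [pv_strIsdigit_eq_all, pv_all_rf2,
      pv_countP_rf '-' (by decide), pv_countP_rf '.' (by decide),
      pv_numLikeLoop_eq]
  simp

-- the keyword scans agree: some keyword among the lowered columns ↔ not disjoint from the set
theorem pv_keyword_eq (ls : List String) :
    pvKeywords.any (fun k => ls.contains k) = !(PySem.Set.isdisjoint pvKeywordSet ls) := by
  have hmem : ∀ x : String, x ∈ pvKeywordSet ↔ x ∈ pvKeywords := fun x =>
    PySem.Set.mem_ofList ["open", "high", "low", "close", "volume", "timestamp", "time", "c", "o", "h", "l", "v"] x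
  rw [Bool.eq_iff_iff]
  simp only [List.any_eq_true, List.contains_iff_mem, Bool.not_eq_true']
  constructor
  · rintro ⟨x, hk, hl⟩
    by_contra hne
    have hd : PySem.Set.isdisjoint pvKeywordSet ls = true := by
      cases hdd : PySem.Set.isdisjoint pvKeywordSet ls
      · exact absurd hdd hne
      · rfl
    exact ((PySem.Set.isdisjoint_iff pvKeywordSet ls).mp hd) x ((hmem x).mpr hk) hl
  · intro hd
    have : ¬ ∀ x ∈ pvKeywordSet, x ∉ ls := by
      intro hall
      rw [(PySem.Set.isdisjoint_iff pvKeywordSet ls).mpr hall] at hd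
      exact Bool.noConfusion hd
    simp only [not_forall, not_not, exists_prop] at this
    obtain ⟨x, hk, hl⟩ := this
    exact ⟨x, (hmem x).mp hk, hl⟩

-- ===== VERDICT (by name: the statement is the Claim_ definition above) =====
theorem columns_look_headerless_py_spec : Claim_equal_columns_look_headerless_py := by
  intro cols _
  unfold Spec_columns_look_headerless_py columns_look_headerless_py columns_look_headerless_py_alt
  simp only [List.map_map, Function.comp_def, ← pv_keyword_eq]
  split_ifs with h
  · rfl
  · rw [PySem.List.foldl_count_if, PySem.List.sum_map_ite_one_zero, zero_add,
        List.countP_congr (fun c _ => by rw [pv_numeric_eq])]
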